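-- pv_equiv track=rewrite | github.com/eceakdeemir/Leetcode-Solutions | 2690-house-robber-iv/2690-house-robber-iv.py | func
-- ===== SOURCE A (Python) =====
-- def func(capability, k, nums):
--     count = 0
--     i = 0
--     while (i < len(nums)):
--         if nums[i] <= capability:
--             count += 1
--             i += 2
--         else:
--             i += 1
--     return count >= k
-- ===== SOURCE B (Python) =====
-- def func(capability, k, nums):
--     # Stage 1: lengths of maximal runs of consecutive houses with value <= capability.
--     runs = []
--     run = 0
--     for x in nums:
--         if x <= capability:
--             run += 1
--         else:
--             runs.append(run)
--             run = 0
--     runs.append(run)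
--     # Stage 2: a run of length L yields ceil(L/2) non-adjacent selectable houses.
--     return sum((L + 1) // 2 for L in runs) >= k
-- ===== Notes on version B (the rewrite author's own statement) =====
-- stated objective: alternative
-- what changed: Replaced A's greedy index-skipping while loop by a two-stage run-length algorithm: first collect the lengths of maximal runs of consecutive houses with value <= capability, then sum the closed form ceil(L/2) over the runs.
import Mathlib
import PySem

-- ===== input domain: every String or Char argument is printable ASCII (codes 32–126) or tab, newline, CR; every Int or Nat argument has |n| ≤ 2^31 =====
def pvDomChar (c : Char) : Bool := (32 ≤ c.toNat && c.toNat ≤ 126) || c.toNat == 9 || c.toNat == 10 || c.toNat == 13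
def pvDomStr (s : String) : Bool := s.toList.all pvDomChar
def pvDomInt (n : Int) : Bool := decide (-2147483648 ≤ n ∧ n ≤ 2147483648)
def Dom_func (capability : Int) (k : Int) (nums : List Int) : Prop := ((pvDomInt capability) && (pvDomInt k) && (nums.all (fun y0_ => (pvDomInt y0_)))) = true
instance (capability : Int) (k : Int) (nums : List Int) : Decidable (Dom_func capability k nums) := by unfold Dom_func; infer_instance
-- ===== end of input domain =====

-- B replaces A's greedy index-skipping while loop with a two-stage run-length
-- algorithm: collect lengths of maximal runs of houses ≤ capability, then sum
-- the closed form ceil(L/2) over the runs (alternative algorithm, same cost).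


-- ===== PORT A =====
-- A's while loop: index i, advanced by 2 when nums[i] ≤ capability (count += 1), else by 1.
def funcLoop (capability : Int) (nums : List Int) (count : Int) (i : Nat) : Int :=
  if h : i < nums.length then
    if nums[i] ≤ capability then funcLoop capability nums (count + 1) (i + 2)
    else funcLoop capability nums count (i + 1)
  else count
termination_by nums.length - i

def func (capability : Int) (k : Int) (nums : List Int) : Bool :=
  decide (funcLoop capability nums 0 0 ≥ k)

-- ===== PORT B =====
-- Stage 1 of Source B: fold building (runs, run).
def runStep (capability : Int) (s : List Int × Int) (x : Int) : List Int × Int :=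
  if x ≤ capability then (s.1, s.2 + 1) else (s.1 ++ [s.2], 0)

def func_alt (capability : Int) (k : Int) (nums : List Int) : Bool :=
  let s := nums.foldl (runStep capability) ([], 0)
  let runs := s.1 ++ [s.2]
  -- Stage 2 of Source B: sum((L + 1) // 2 for L in runs)
  decide ((runs.map (fun L => PySem.Int.floordiv (L + 1) 2)).sum ≥ k)

-- ===== PRECONDITION & SPEC =====
def Spec_func (capability : Int) (k : Int) (nums : List Int) (out : Bool) : Prop := out = func_alt capability k nums
instance (capability : Int) (k : Int) (nums : List Int) (out : Bool) : Decidable (Spec_func capability k nums out) := by unfold Spec_func; infer_instance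

-- ===== CLAIM (what is proved, stated in full; the proofs are below) =====
def Claim_equal_func : Prop := ∀ (capability : Int) (k : Int) (nums : List Int), Dom_func capability k nums → Spec_func capability k nums (func capability k nums)

-- ===== LEMMAS AND PROOFS =====

-- ceil((L+1)/2) contribution of a run of length L
def hh (L : Int) : Int := PySem.Int.floordiv (L + 1) 2

-- value of B's total given the current open run length r and the remaining list l
def fB (capability : Int) (r : Int) : List Int → Int
  | [] => hh r
  | x :: xs => if x ≤ capability then fB capability (r + 1) xs else hh r + fB capability 0 xs

lemma hh_add_two (r : Int) : hh (r + 2) = hh r + 1 := by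
  unfold hh
  rw [PySem.Int.floordiv_eq_ediv_of_pos (by norm_num), PySem.Int.floordiv_eq_ediv_of_pos (by norm_num)]
  omega

lemma fB_shift (capability : Int) (l : List Int) (r : Int) :
    fB capability (r + 2) l = 1 + fB capability r l := by
  induction l generalizing r with
  | nil => simp [fB, hh_add_two]; ring
  | cons x xs ih =>
    by_cases hx : x ≤ capability
    · simp only [fB, if_pos hx]
      have := ih (r + 1)
      rw [show r + 2 + 1 = r + 1 + 2 from by ring, this]
    · simp only [fB, if_neg hx, hh_add_two]; ring

-- B's foldl computes sums over closed runs plus fB of the open run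
lemma foldl_runStep (capability : Int) (l : List Int) (runs : List Int) (r : Int) :
    (((l.foldl (runStep capability) (runs, r)).1 ++ [(l.foldl (runStep capability) (runs, r)).2]).map hh).sum
      = (runs.map hh).sum + fB capability r l := by
  induction l generalizing runs r with
  | nil => simp [fB]
  | cons x xs ih =>
    by_cases hx : x ≤ capability
    · simp only [List.foldl_cons, runStep, if_pos hx]
      rw [ih]
      simp [fB, hx]
    · simp only [List.foldl_cons, runStep, if_neg hx]
      rw [ih]
      simp [fB, hx]
      ring

-- A's count: structural recursion over the list, skipping one element after a take
def g (capability : Int) : List Int → Int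
  | [] => 0
  | [x] => if x ≤ capability then 1 else 0
  | x :: y :: xs => if x ≤ capability then 1 + g capability xs else g capability (y :: xs)

lemma funcLoop_eq_g (capability : Int) (nums : List Int) (count : Int) (i : Nat) :
    funcLoop capability nums count i = count + g capability (nums.drop i) := by
  induction hn : nums.length - i using Nat.strong_induction_on generalizing count i with
  | _ n ih =>
    rw [funcLoop]
    by_cases h : i < nums.length
    · have hdrop : nums.drop i = nums[i] :: nums.drop (i + 1) := by
        rw [List.drop_eq_getElem_cons h]
      simp only [h, dif_pos]
      by_cases hx : nums[i] ≤ capability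
      · rw [if_pos hx]
        rw [ih (nums.length - (i+2)) (by omega) _ _ rfl]
        rw [hdrop]
        by_cases h1 : i + 1 < nums.length
        · have hdrop1 : nums.drop (i+1) = nums[i+1] :: nums.drop (i + 2) := by
            rw [List.drop_eq_getElem_cons h1]
          rw [hdrop1, g, if_pos hx]; ring
        · have e1 : nums.drop (i+1) = [] := by
            apply List.drop_eq_nil_of_le; omega
          have e2 : nums.drop (i+2) = [] := by
            apply List.drop_eq_nil_of_le; omega
          rw [e1, e2]
          simp only [g, if_pos hx]
          ring
      · rw [if_neg hx]
        rw [ih (nums.length - (i+1)) (by omega) _ _ rfl]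
        rw [hdrop]
        by_cases h1 : i + 1 < nums.length
        · have hdrop1 : nums.drop (i+1) = nums[i+1] :: nums.drop (i + 2) := by
            rw [List.drop_eq_getElem_cons h1]
          rw [hdrop1, g, if_neg hx, ← hdrop1]
        · have hnil : nums.drop (i+1) = [] := by
            apply List.drop_eq_nil_of_le; omega
          rw [hnil]
          simp only [g, if_neg hx]
    · simp only [h, dif_neg, not_false_iff]
      have : nums.drop i = [] := by apply List.drop_eq_nil_of_le; omega
      simp [this, g]

lemma hh_zero : hh 0 = 0 := by decide
lemma hh_one : hh 1 = 1 := by decide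

-- A's greedy count equals B's run-length total
lemma g_eq_fB (capability : Int) (l : List Int) : g capability l = fB capability 0 l := by
  induction hn : l.length using Nat.strong_induction_on generalizing l with
  | _ n ih =>
    match l with
    | [] => simp [g, fB, hh_zero]
    | [x] =>
      by_cases hx : x ≤ capability <;>
        simp [g, fB, hx, hh_zero, hh_one]
    | x :: y :: xs =>
      by_cases hx : x ≤ capability
      · rw [g, if_pos hx]
        simp only [fB, if_pos hx]
        rw [ih xs.length (by subst hn; simp only [List.length_cons]; omega) _ rfl]
        by_cases hy : y ≤ capability
        · rw [if_pos hy, show (0:Int) + 1 + 1 = 0 + 2 from by ring, fB_shift]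
        · rw [if_neg hy, show (0:Int) + 1 = 1 from by ring, hh_one]
      · rw [g, if_neg hx]
        simp only [fB, if_neg hx, hh_zero]
        rw [ih (y :: xs).length (by subst hn; simp only [List.length_cons]; omega) _ rfl]
        simp [fB, hh_zero]

-- ===== VERDICT (by name: the statement is the Claim_ definition above) =====
theorem func_spec : Claim_equal_func := by
  intro capability k nums _
  unfold Spec_func func func_alt
  simp only
  rw [funcLoop_eq_g, show (fun L => PySem.Int.floordiv (L + 1) 2) = hh from rfl,
    foldl_runStep, g_eq_fB]
  simp
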